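-- pv_equiv track=rewrite | github.com/charlespittman/advent_of_code | 2024/day_02/main.py | part1
-- ===== SOURCE A (Python) =====
-- def is_increasing(report: list[int]) -> bool:
--     return True if report == sorted(report) else False
--
-- def is_decreasing(report: list[int]) -> bool:
--     return True if report == sorted(report, reverse=True) else False
--
-- def is_small_steps(report: list[int]) -> bool:
--     for idx, level in enumerate(report):
--         if idx >= 0 and idx < len(report) - 1:
--             diff = abs(level - report[idx + 1])
--             if (diff < 1) or (diff > 3):
--                 return False
--     return True
--
-- def safe_report(report: list[int]) -> bool:
--     return any([is_increasing(report), is_decreasing(report)]) and is_small_steps(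
--         report
--     )
--
-- def part1(reports: list[list[int]]) -> tuple[list[int]]:
--     safe_reports = []
--     unsafe_reports = []
--     for report in reports:
--         safe = safe_report(report)
--         if safe:
--             safe_reports.append(report)
--         else:
--             unsafe_reports.append(report)
--     return safe_reports, unsafe_reports
-- ===== SOURCE B (Python) =====
-- def part1(reports: list[list[int]]) -> tuple[list[int]]:
--     def safe(report):
--         diffs = [b - a for a, b in zip(report, report[1:])]
--         return all(1 <= d <= 3 for d in diffs) or all(-3 <= d <= -1 for d in diffs)
--     return [r for r in reports if safe(r)], [r for r in reports if not safe(r)]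
-- ===== Notes on version B (the rewrite author's own statement) =====
-- stated objective: simpler
-- what changed: Safety is decided in one linear pass over adjacent differences (all in [1,3] or all in [-3,-1]) instead of sorting the report twice plus a separate indexed step-size loop, and the partition is built by two comprehensions instead of an append loop.
import Mathlib
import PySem

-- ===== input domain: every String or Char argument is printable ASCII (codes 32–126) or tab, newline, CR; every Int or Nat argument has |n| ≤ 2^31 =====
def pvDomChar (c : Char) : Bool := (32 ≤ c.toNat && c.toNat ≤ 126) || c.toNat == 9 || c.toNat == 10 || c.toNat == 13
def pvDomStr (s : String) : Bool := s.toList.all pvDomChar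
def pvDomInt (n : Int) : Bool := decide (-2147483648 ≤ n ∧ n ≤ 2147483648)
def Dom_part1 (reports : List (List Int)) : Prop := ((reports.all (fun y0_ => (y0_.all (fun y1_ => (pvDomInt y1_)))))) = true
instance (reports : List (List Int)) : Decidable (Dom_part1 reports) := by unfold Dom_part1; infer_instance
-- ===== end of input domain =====

-- B decides safety in one pass over adjacent differences (all in [1,3] or all in [-3,-1])
-- instead of sorting twice plus an indexed step-size loop; objective: simpler.


-- ===== PORT A =====
def isIncreasing (report : List Int) : Bool :=
  if report = PySem.List.sorted report (fun x => x) false then true else false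

def isDecreasing (report : List Int) : Bool :=
  if report = PySem.List.sorted report (fun x => x) true then true else false

-- the 'for idx, level in enumerate(report)' loop of is_small_steps (early return = false)
def smallStepsGo (report : List Int) : List (Int × Int) → Bool
  | [] => true
  | (idx, level) :: rest =>
    if idx ≥ 0 ∧ idx < (report.length : Int) - 1 then
      let diff := (level - PySem.List.pyGetD report (idx + 1) 0).natAbs
      if diff < 1 ∨ diff > 3 then false else smallStepsGo report rest
    else smallStepsGo report rest

def isSmallSteps (report : List Int) : Bool :=
  smallStepsGo report (PySem.List.enumerate report 0)

def safeReport (report : List Int) : Bool :=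
  ([isIncreasing report, isDecreasing report].any (fun b => b)) && isSmallSteps report

def part1 (reports : List (List Int)) : List (List Int) × List (List Int) :=
  let acc := reports.foldl
    (fun (acc : List (List Int) × List (List Int)) report =>
      if safeReport report then (acc.1 ++ [report], acc.2) else (acc.1, acc.2 ++ [report]))
    ([], [])
  (acc.1, acc.2)

-- ===== PORT B =====
def safeAlt (report : List Int) : Bool :=
  let diffs := (report.zip (PySem.List.slice report (some 1) none)).map (fun p => p.2 - p.1)
  diffs.all (fun d => 1 ≤ d && d ≤ 3) || diffs.all (fun d => -3 ≤ d && d ≤ -1)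

def part1_alt (reports : List (List Int)) : List (List Int) × List (List Int) :=
  (reports.filter (fun r => safeAlt r), reports.filter (fun r => !safeAlt r))

-- ===== PRECONDITION & SPEC =====
def Spec_part1 (reports : List (List Int)) (out : List (List Int) × List (List Int)) : Prop := out = part1_alt reports
instance (reports : List (List Int)) (out : List (List Int) × List (List Int)) : Decidable (Spec_part1 reports out) := by unfold Spec_part1; infer_instance

-- ===== CLAIM (what is proved, stated in full; the proofs are below) =====
def Claim_equal_part1 : Prop := ∀ (reports : List (List Int)), Dom_part1 reports → Spec_part1 reports (part1 reports)

-- ===== LEMMAS AND PROOFS =====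

-- Pairwise order of the whole list is equivalent to order of adjacent pairs.
theorem pairwise_iff_zip_all {le : Int → Int → Prop} [DecidableRel le]
    (htrans : ∀ a b c, le a b → le b c → le a c) (r : List Int) :
    r.Pairwise le ↔ ((r.zip r.tail).all (fun p => decide (le p.1 p.2)) = true) := by
  induction r with
  | nil => simp
  | cons x t ih =>
    cases t with
    | nil => simp
    | cons y t' =>
      simp only [List.tail_cons, List.zip_cons_cons, List.all_cons, Bool.and_eq_true,
        decide_eq_true_eq] at ih ⊢
      constructor
      · intro hp
        obtain ⟨hx, hp'⟩ := List.pairwise_cons.1 hp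
        exact ⟨hx y (by simp), ih.1 hp'⟩
      · rintro ⟨hxy, hrest⟩
        have hp := ih.2 hrest
        refine List.pairwise_cons.2 ⟨?_, hp⟩
        intro z hz
        rcases List.mem_cons.1 hz with rfl | hz'
        · exact hxy
        · exact htrans _ _ _ hxy (List.rel_of_pairwise_cons hp hz')

theorem isIncreasing_iff (r : List Int) :
    isIncreasing r = true ↔ r.Pairwise (fun a b => a ≤ b) := by
  unfold isIncreasing
  constructor
  · intro h
    split_ifs at h with he
    · rw [he]
      simpa using PySem.List.sorted_pairwise r (fun x => x)
  · intro hp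
    rw [if_pos (PySem.List.sorted_eq_self_of_pairwise r (fun x => x) hp).symm]

theorem isDecreasing_iff (r : List Int) :
    isDecreasing r = true ↔ r.Pairwise (fun a b => b ≤ a) := by
  unfold isDecreasing
  constructor
  · intro h
    split_ifs at h with he
    · rw [he]
      simpa using PySem.List.sorted_pairwise_rev r (fun x => x)
  · intro hp
    rw [if_pos (PySem.List.sorted_rev_eq_self_of_pairwise r (fun x => x) hp).symm]

-- invariant of the enumerate loop of is_small_steps
theorem smallStepsGo_spec (r : List Int) :
    ∀ (suf : List Int) (k : Nat), r.drop k = suf →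
    smallStepsGo r (PySem.List.enumerate suf (k : Int)) =
      (suf.zip suf.tail).all (fun p => !((p.1 - p.2).natAbs < 1 || (p.1 - p.2).natAbs > 3)) := by
  intro suf
  induction suf with
  | nil => intro k _; simp [PySem.List.enumerate, smallStepsGo]
  | cons x rest ih =>
    intro k hk
    have hklen : k < r.length := by
      by_contra h
      rw [List.drop_eq_nil_of_le (by omega)] at hk
      simp at hk
    have hrest : r.drop (k + 1) = rest := by
      rw [← List.tail_drop, hk]; rfl
    rw [PySem.List.enumerate_cons]
    cases rest with
    | nil =>
      have hlen : r.length = k + 1 := by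
        have := congrArg List.length hrest
        simp at this; omega
      simp only [smallStepsGo]
      rw [if_neg (by omega)]
      simp [PySem.List.enumerate, smallStepsGo]
    | cons y rest' =>
      have hlen : k + 1 < r.length := by
        have := congrArg List.length hrest
        simp at this; omega
      have hget : PySem.List.pyGetD r ((k : Int) + 1) 0 = y := by
        have hcast : ((k : Int) + 1) = ((k + 1 : Nat) : Int) := by push_cast; ring
        rw [hcast, PySem.List.pyGetD_natCast]
        have hidx : r[k+1]? = some y := by
          have := congrArg (fun l => l[0]?) hrest
          simpa [List.getElem?_drop] using this
        simp [List.getD, hidx]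
      simp only [smallStepsGo]
      rw [if_pos ⟨Int.natCast_nonneg k, by omega⟩]
      rw [hget]
      by_cases hd : (x - y).natAbs < 1 ∨ (x - y).natAbs > 3
      · rw [if_pos hd]
        simp only [List.tail_cons, List.zip_cons_cons, List.all_cons]
        have hfalse : (!((x - y).natAbs < 1 || (x - y).natAbs > 3)) = false := by
          simp; omega
        rw [hfalse, Bool.false_and]
      · rw [if_neg hd]
        have hcast : ((k : Int) + 1) = ((k + 1 : Nat) : Int) := by push_cast; ring
        rw [hcast, ih (k + 1) hrest]
        simp only [List.tail_cons, List.zip_cons_cons, List.all_cons]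
        have htrue : (!((x - y).natAbs < 1 || (x - y).natAbs > 3)) = true := by
          simp; omega
        rw [htrue, Bool.true_and]

theorem isSmallSteps_eq (r : List Int) :
    isSmallSteps r =
      (r.zip r.tail).all (fun p => !((p.1 - p.2).natAbs < 1 || (p.1 - p.2).natAbs > 3)) := by
  unfold isSmallSteps
  exact smallStepsGo_spec r r 0 (by simp)

-- per-report equivalence: A's safe_report equals B's one-pass test
theorem safeReport_eq_safeAlt (r : List Int) : safeReport r = safeAlt r := by
  unfold safeReport safeAlt
  rw [PySem.List.slice_from_one, Bool.eq_iff_iff]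
  simp only [List.any_cons, List.any_nil, Bool.or_false, Bool.and_eq_true, Bool.or_eq_true,
    isSmallSteps_eq, isIncreasing_iff, isDecreasing_iff,
    pairwise_iff_zip_all (le := fun a b => a ≤ b) (fun a b c h1 h2 => le_trans h1 h2) r,
    pairwise_iff_zip_all (le := fun a b => b ≤ a) (fun a b c h1 h2 => le_trans h2 h1) r,
    List.all_map, List.all_eq_true]
  constructor
  · rintro ⟨hmono | hmono, hsmall⟩
    · left
      intro p hp
      have h1 := hmono p hp
      have h2 := hsmall p hp
      simp only [decide_eq_true_eq, Bool.not_eq_true', Bool.or_eq_false_iff,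
        decide_eq_false_iff_not, not_lt] at h1 h2 ⊢
      simp only [Function.comp, Bool.and_eq_true, decide_eq_true_eq]
      omega
    · right
      intro p hp
      have h1 := hmono p hp
      have h2 := hsmall p hp
      simp only [decide_eq_true_eq, Bool.not_eq_true', Bool.or_eq_false_iff,
        decide_eq_false_iff_not, not_lt] at h1 h2 ⊢
      simp only [Function.comp, Bool.and_eq_true, decide_eq_true_eq]
      omega
  · rintro (hall | hall)
    · refine ⟨Or.inl ?_, ?_⟩ <;>
      · intro p hp
        have h := hall p hp
        simp only [Function.comp, Bool.and_eq_true, decide_eq_true_eq] at h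
        simp only [decide_eq_true_eq, Bool.not_eq_true', Bool.or_eq_false_iff,
          decide_eq_false_iff_not, not_lt]
        omega
    · refine ⟨Or.inr ?_, ?_⟩ <;>
      · intro p hp
        have h := hall p hp
        simp only [Function.comp, Bool.and_eq_true, decide_eq_true_eq] at h
        simp only [decide_eq_true_eq, Bool.not_eq_true', Bool.or_eq_false_iff,
          decide_eq_false_iff_not, not_lt]
        omega

-- the append loop of A builds exactly the two filters
theorem foldl_partition (l : List (List Int)) (s u : List (List Int)) :
    l.foldl (fun (acc : List (List Int) × List (List Int)) report =>
        if safeReport report then (acc.1 ++ [report], acc.2) else (acc.1, acc.2 ++ [report]))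
      (s, u) =
      (s ++ l.filter (fun r => safeAlt r), u ++ l.filter (fun r => !safeAlt r)) := by
  induction l generalizing s u with
  | nil => simp
  | cons x t ih =>
    simp only [safeReport_eq_safeAlt] at ih ⊢
    by_cases h : safeAlt x = true
    · simp [List.foldl_cons, h, ih]
    · simp [List.foldl_cons, h, ih]

-- ===== VERDICT (by name: the statement is the Claim_ definition above) =====
theorem part1_spec : Claim_equal_part1 := by
  intro reports _
  unfold Spec_part1 part1 part1_alt
  simp only [foldl_partition reports [] []]
  simp
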